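-- pv_equiv track=rewrite | github.com/lucamarien/rawtherapee-mcp-server | src/rawtherapee_mcp/server.py | _pp3_text_has_crop
-- ===== SOURCE A (Python) =====
-- def _pp3_text_has_crop(pp3_text: str) -> bool:
--     """Check if raw PP3 text has Crop enabled, without full parsing."""
--     current_section = ""
--     for line in pp3_text.splitlines():
--         stripped = line.strip()
--         if stripped.startswith("[") and stripped.endswith("]"):
--             current_section = stripped[1:-1]
--             continue
--         if current_section == "Crop" and stripped == "Enabled=true":
--             return True
--     return False
-- ===== SOURCE B (Python) =====
-- def _pp3_text_has_crop(pp3_text: str) -> bool: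
--     """Check if raw PP3 text has Crop enabled, without full parsing."""
--     found = False
--     pending = False  # an "Enabled=true" line below, with no header in between
--     for line in reversed(pp3_text.splitlines()):
--         stripped = line.strip()
--         if stripped.startswith("[") and stripped.endswith("]"):
--             if stripped[1:-1] == "Crop" and pending:
--                 found = True
--             pending = False
--         elif stripped == "Enabled=true":
--             pending = True
--     return found
-- ===== Notes on version B (the rewrite author's own statement) =====
-- stated objective: alternative
-- what changed: Replaces the forward state machine that tracks the current section name and early-returns with a backward scan over the lines carrying only a boolean pending flag (an enabled line seen below with no header in between), set to found when a Crop header is reached; no section-name state is kept.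
import Mathlib
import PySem

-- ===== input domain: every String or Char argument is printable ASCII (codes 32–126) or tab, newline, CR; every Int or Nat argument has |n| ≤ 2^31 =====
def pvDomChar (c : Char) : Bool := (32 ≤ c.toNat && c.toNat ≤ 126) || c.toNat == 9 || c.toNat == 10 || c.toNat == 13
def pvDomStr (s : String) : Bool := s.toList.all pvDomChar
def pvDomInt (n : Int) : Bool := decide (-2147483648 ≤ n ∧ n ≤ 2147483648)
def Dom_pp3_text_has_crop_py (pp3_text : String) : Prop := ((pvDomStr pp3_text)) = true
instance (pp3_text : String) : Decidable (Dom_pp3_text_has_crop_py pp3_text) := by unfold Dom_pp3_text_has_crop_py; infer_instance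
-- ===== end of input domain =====

-- B scans the lines BACKWARD with a boolean 'pending Enabled=true below' flag instead of A's
-- forward current-section state machine (alternative decomposition, same cost).


-- ===== PORT A =====
-- A's for-loop with early return, as structural recursion with the current_section accumulator
def pvALoop : List String → String → Bool
  | [], _ => false
  | line :: rest, cur =>
    let stripped := PySem.Str.strip line
    if PySem.Str.startswith stripped "[" && PySem.Str.endswith stripped "]" then
      pvALoop rest (PySem.Str.slice stripped (some 1) (some (-1)))
    else if cur == "Crop" && stripped == "Enabled=true" then true
    else pvALoop rest cur

def pp3_text_has_crop_py (pp3_text : String) : Bool :=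
  pvALoop (PySem.Str.splitlines pp3_text) ""

-- ===== PORT B =====
-- one step of B's backward loop: state = (found, pending)
def pvBStep (st : Bool × Bool) (line : String) : Bool × Bool :=
  let stripped := PySem.Str.strip line
  if PySem.Str.startswith stripped "[" && PySem.Str.endswith stripped "]" then
    (st.1 || (PySem.Str.slice stripped (some 1) (some (-1)) == "Crop" && st.2), false)
  else if stripped == "Enabled=true" then (st.1, true)
  else st

def pp3_text_has_crop_py_alt (pp3_text : String) : Bool :=
  ((PySem.Str.splitlines pp3_text).reverse.foldl pvBStep (false, false)).1

-- ===== PRECONDITION & SPEC =====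
def Spec_pp3_text_has_crop_py (pp3_text : String) (out : Bool) : Prop := out = pp3_text_has_crop_py_alt pp3_text
instance (pp3_text : String) (out : Bool) : Decidable (Spec_pp3_text_has_crop_py pp3_text out) := by unfold Spec_pp3_text_has_crop_py; infer_instance

-- ===== CLAIM (what is proved, stated in full; the proofs are below) =====
def Claim_equal_pp3_text_has_crop_py : Prop := ∀ (pp3_text : String), Dom_pp3_text_has_crop_py pp3_text → Spec_pp3_text_has_crop_py pp3_text (pp3_text_has_crop_py pp3_text)

-- ===== LEMMAS AND PROOFS =====

-- invariant: let (f, p) be B's backward-scan state after the suffix ls;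
-- A's forward scan of ls from section cur returns f || (cur == "Crop" && p)
theorem pvKey (ls : List String) (cur : String) :
    pvALoop ls cur
      = ((List.foldr (fun x s => pvBStep s x) (false, false) ls).1
          || (cur == "Crop" && (List.foldr (fun x s => pvBStep s x) (false, false) ls).2)) := by
  induction ls generalizing cur with
  | nil => simp [pvALoop]
  | cons line rest ih =>
    simp only [pvALoop, List.foldr_cons]
    generalize hF : List.foldr (fun x s => pvBStep s x) ((false : Bool), (false : Bool)) rest = F at ih ⊢
    obtain ⟨f, p⟩ := F
    simp only [pvBStep]
    by_cases h : (PySem.Str.startswith (PySem.Str.strip line) "[" &&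
        PySem.Str.endswith (PySem.Str.strip line) "]") = true
    · rw [if_pos h, if_pos h, ih]
      simp
    · rw [if_neg h, if_neg h]
      by_cases he : (PySem.Str.strip line == "Enabled=true") = true
      · rw [if_pos he]
        by_cases hc : (cur == "Crop") = true
        · simp [hc, he]
        · rw [if_neg (by simp_all), ih]
          simp [hc]
      · rw [if_neg he, if_neg (by simp_all), ih]

-- ===== VERDICT (by name: the statement is the Claim_ definition above) =====
theorem pp3_text_has_crop_py_spec : Claim_equal_pp3_text_has_crop_py := by
  intro t _
  unfold Spec_pp3_text_has_crop_py pp3_text_has_crop_py pp3_text_has_crop_py_alt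
  rw [List.foldl_reverse, pvKey]
  simp
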